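-- pv_equiv track=rewrite | github.com/shanji97/ieps | pa1/crawler/client_multithread.py | parse_robots_content
-- ===== SOURCE A (Python) =====
-- def parse_robots_content(robots_content):
--     """
--     Parse robots.txt (User-agent, Allow, Disallow, Crawl-delay and Sitemap), only for user-agent: *
--
--     Input:
--
--     * robots_content: content of robots.txt
--     """
--     user_agent_found = False
--     disallowed_pages = []
--     allowed_pages = []
--     crawl_delay = 5
--     sitemap = None
--     for line in robots_content.split("\n"):
--         split_line = line.strip().lower().split(" ")
--         if len(split_line) == 2:
--             if user_agent_found:
--                 if split_line[0] == "user-agent:" and split_line[1] != "*":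
--                     user_agent_found = False
--                 elif split_line[0] == "disallow:":
--                     disallowed_pages.append(split_line[1])
--                 elif split_line[0] == "allow:":
--                     allowed_pages.append(split_line[1])
--                 elif split_line[0] == "crawl-delay:" and split_line[1].isnumeric():
--                     crawl_delay = int(split_line[1])
--                 elif split_line[0] == "sitemap:":
--                     sitemap = split_line[1]
--             elif split_line[0] == "user-agent:" and split_line[1] == "*":
--                 user_agent_found = True
--     return (disallowed_pages, allowed_pages, crawl_delay, sitemap)
-- ===== SOURCE B (Python) =====
-- def parse_robots_content(robots_content):
--     # Two-pass re-implementation: first partition the lines (scanned bottom-up so each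
--     # section can be emitted as soon as its header is seen) into user-agent sections,
--     # then fold the directives of the '*' sections only.
--     pending = []       # directive token pairs below the current line, bottom-up order
--     sections_rev = []  # (agent, directives) sections, bottom-up order
--     for line in reversed(robots_content.split("\n")):
--         tokens = line.strip().lower().split(" ")
--         if len(tokens) == 2:
--             if tokens[0] == "user-agent:":
--                 sections_rev.append((tokens[1], pending[::-1]))
--                 pending = []
--             else:
--                 pending.append((tokens[0], tokens[1]))
--     disallowed, allowed, crawl_delay, sitemap = [], [], 5, None
--     for agent, directives in sections_rev[::-1]:
--         if agent != "*":
--             continue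
--         for key, value in directives:
--             if key == "disallow:":
--                 disallowed.append(value)
--             elif key == "allow:":
--                 allowed.append(value)
--             elif key == "crawl-delay:" and value.isnumeric():
--                 crawl_delay = int(value)
--             elif key == "sitemap:":
--                 sitemap = value
--     return (disallowed, allowed, crawl_delay, sitemap)
-- ===== Notes on version B (the rewrite author's own statement) =====
-- stated objective: alternative
-- what changed: Replaces A's single state-machine pass with a user_agent_found flag by a two-pass decomposition: a bottom-up scan partitions the lines into user-agent sections, then a second pass folds the directives of the '*' sections only.
import Mathlib
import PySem

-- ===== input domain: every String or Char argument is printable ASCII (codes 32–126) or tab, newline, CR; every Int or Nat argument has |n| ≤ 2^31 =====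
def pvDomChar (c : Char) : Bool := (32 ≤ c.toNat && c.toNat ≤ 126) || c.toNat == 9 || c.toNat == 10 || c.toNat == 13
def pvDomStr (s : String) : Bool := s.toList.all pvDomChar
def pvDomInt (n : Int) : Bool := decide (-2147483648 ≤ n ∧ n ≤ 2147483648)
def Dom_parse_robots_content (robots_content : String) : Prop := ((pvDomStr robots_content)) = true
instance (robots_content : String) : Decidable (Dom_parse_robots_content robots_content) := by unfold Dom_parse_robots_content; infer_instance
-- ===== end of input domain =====

-- B replaces A's user-agent-flag state machine by a two-pass decomposition (partition
-- lines into user-agent sections bottom-up, then fold directives of '*' sections);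
-- objective: alternative (same cost, different structure).


-- ===== PORT A =====
-- tokens of one line: line.strip().lower().split(" ")
def pvATokens (line : String) : List String :=
  (PySem.Str.split? (PySem.Str.lower (PySem.Str.strip line)) " ").getD []

-- body of A's loop on a len-2 token list (str.isnumeric = strIsdigit on the ASCII domain;
-- int(t1) = (ofStr? t1).getD _, total because guarded by the digit test)
def pvAStep2 (st : Bool × List String × List String × Int × Option String)
    (t0 t1 : String) : Bool × List String × List String × Int × Option String :=
  let (found, dis, al, cd, sm) := st
  if found then
    if t0 == "user-agent:" && !(t1 == "*") then (false, dis, al, cd, sm)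
    else if t0 == "disallow:" then (found, dis ++ [t1], al, cd, sm)
    else if t0 == "allow:" then (found, dis, al ++ [t1], cd, sm)
    else if t0 == "crawl-delay:" && PySem.Str.strIsdigit t1 then
      (found, dis, al, (PySem.Int.ofStr? t1).getD cd, sm)
    else if t0 == "sitemap:" then (found, dis, al, cd, some t1)
    else st
  else if t0 == "user-agent:" && t1 == "*" then (true, dis, al, cd, sm)
  else st

def pvAStep (st : Bool × List String × List String × Int × Option String)
    (line : String) : Bool × List String × List String × Int × Option String :=
  match pvATokens line with
  | [t0, t1] => pvAStep2 st t0 t1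
  | _ => st

def parse_robots_content (robots_content : String) : List String × List String × Int × Option String :=
  (((PySem.Str.split? robots_content "\n").getD []).foldl pvAStep (false, [], [], 5, none)).2

-- ===== PORT B =====
def pvBTokens (line : String) : List String :=
  (PySem.Str.split? (PySem.Str.lower (PySem.Str.strip line)) " ").getD []

-- pass 1 step, over the lines in REVERSED order (Source B's loop body)
def pvBStep (st : List (String × String) × List (String × List (String × String)))
    (line : String) : List (String × String) × List (String × List (String × String)) :=
  let (pending, secsRev) := st
  match pvBTokens line with
  | [t0, t1] =>
    if t0 == "user-agent:" then ([], secsRev ++ [(t1, pending.reverse)])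
    else (pending ++ [(t0, t1)], secsRev)
  | _ => st

-- pass 2 inner step: one directive of a '*' section
def pvDirStep (acc : List String × List String × Int × Option String)
    (d : String × String) : List String × List String × Int × Option String :=
  let (dis, al, cd, sm) := acc
  if d.1 == "disallow:" then (dis ++ [d.2], al, cd, sm)
  else if d.1 == "allow:" then (dis, al ++ [d.2], cd, sm)
  else if d.1 == "crawl-delay:" && PySem.Str.strIsdigit d.2 then
    (dis, al, (PySem.Int.ofStr? d.2).getD cd, sm)
  else if d.1 == "sitemap:" then (dis, al, cd, some d.2)
  else acc

def pvSecStep (acc : List String × List String × Int × Option String)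
    (sec : String × List (String × String)) : List String × List String × Int × Option String :=
  if sec.1 == "*" then sec.2.foldl pvDirStep acc else acc

def parse_robots_content_alt (robots_content : String) : List String × List String × Int × Option String :=
  (((((PySem.Str.split? robots_content "\n").getD []).reverse).foldl pvBStep ([], [])).2.reverse).foldl
    pvSecStep ([], [], 5, none)

-- ===== PRECONDITION & SPEC =====
def Spec_parse_robots_content (robots_content : String) (out : List String × List String × Int × Option String) : Prop := out = parse_robots_content_alt robots_content
instance (robots_content : String) (out : List String × List String × Int × Option String) : Decidable (Spec_parse_robots_content robots_content out) := by unfold Spec_parse_robots_content; infer_instance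

-- ===== CLAIM (what is proved, stated in full; the proofs are below) =====
def Claim_equal_parse_robots_content : Prop := ∀ (robots_content : String), Dom_parse_robots_content robots_content → Spec_parse_robots_content robots_content (parse_robots_content robots_content)

-- ===== LEMMAS AND PROOFS =====

-- proof-side section splitter: (leading directives before any header, sections in order)
def pvSections : List String → List (String × String) × List (String × List (String × String))
  | [] => ([], [])
  | l :: rest =>
    let (pend, secs) := pvSections rest
    match pvBTokens l with
    | [t0, t1] =>
      if t0 == "user-agent:" then ([], (t1, pend) :: secs)
      else ((t0, t1) :: pend, secs)
    | _ => (pend, secs)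

-- B's first pass computes pvSections (with both layers reversed)
lemma pvB_fold (ls : List String) :
    (ls.reverse).foldl pvBStep ([], []) =
      ((pvSections ls).1.reverse, (pvSections ls).2.reverse) := by
  rw [List.foldl_reverse]
  induction ls with
  | nil => simp [pvSections]
  | cons l rest ih =>
    rw [List.foldr_cons, ih]
    cases h : pvBTokens l with
    | nil => simp [pvBStep, pvSections, h]
    | cons a t =>
      cases t with
      | nil => simp [pvBStep, pvSections, h]
      | cons b t2 =>
        cases t2 with
        | nil => by_cases h0 : a == "user-agent:" <;> simp [pvBStep, pvSections, h, h0]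
        | cons c t3 => simp [pvBStep, pvSections, h]

-- main invariant: A's fold from either flag value equals B's second pass over the sections
lemma pvKey (ls : List String) (found : Bool) (acc : List String × List String × Int × Option String) :
    (ls.foldl pvAStep (found, acc)).2 =
      ((pvSections ls).2).foldl pvSecStep
        (if found then ((pvSections ls).1).foldl pvDirStep acc else acc) := by
  induction ls generalizing found acc with
  | nil => cases found <;> simp [pvSections]
  | cons l rest ih =>
    rw [List.foldl_cons]
    cases h : pvBTokens l with
    | nil =>
      have hs : pvSections (l :: rest) = pvSections rest := by simp [pvSections, h]
      have ha : pvAStep (found, acc) l = (found, acc) := by simp [pvAStep, pvATokens, pvBTokens] at h ⊢; rw [h]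
      rw [hs, ha]; exact ih found acc
    | cons a t =>
      cases t with
      | nil =>
        have hs : pvSections (l :: rest) = pvSections rest := by simp [pvSections, h]
        have ha : pvAStep (found, acc) l = (found, acc) := by simp [pvAStep, pvATokens, pvBTokens] at h ⊢; rw [h]
        rw [hs, ha]; exact ih found acc
      | cons b t2 =>
        cases t2 with
        | cons c t3 =>
          have hs : pvSections (l :: rest) = pvSections rest := by simp [pvSections, h]
          have ha : pvAStep (found, acc) l = (found, acc) := by simp [pvAStep, pvATokens, pvBTokens] at h ⊢; rw [h]
          rw [hs, ha]; exact ih found acc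
        | nil =>
          have ha : pvAStep (found, acc) l = pvAStep2 (found, acc) a b := by
            simp [pvAStep, pvATokens, pvBTokens] at h ⊢; rw [h]
          rw [ha]
          by_cases h0 : a == "user-agent:"
          · have hs : pvSections (l :: rest) =
                ([], (b, (pvSections rest).1) :: (pvSections rest).2) := by
              simp [pvSections, h, h0]
            rw [hs]
            by_cases h1 : b == "*"
            · cases found
              · have h2 : pvAStep2 (false, acc) a b = (true, acc) := by
                  obtain ⟨dis, al, cd, sm⟩ := acc; simp [pvAStep2, h0, h1]
                rw [h2, ih true acc]
                simp [pvSecStep, eq_of_beq h1]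
              · have h2 : pvAStep2 (true, acc) a b = (true, acc) := by
                  obtain ⟨dis, al, cd, sm⟩ := acc
                  simp [pvAStep2, eq_of_beq h0, eq_of_beq h1]
                rw [h2, ih true acc]
                simp [pvSecStep, eq_of_beq h1]
            · cases found
              · have h2 : pvAStep2 (false, acc) a b = (false, acc) := by
                  obtain ⟨dis, al, cd, sm⟩ := acc; simp [pvAStep2, h0, h1]
                rw [h2, ih false acc]
                simp [pvSecStep, h1]
              · have h2 : pvAStep2 (true, acc) a b = (false, acc) := by
                  obtain ⟨dis, al, cd, sm⟩ := acc
                  simp [pvAStep2, eq_of_beq h0, h1]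
                rw [h2, ih false acc]
                simp [pvSecStep, h1]
          · have hs : pvSections (l :: rest) =
                ((a, b) :: (pvSections rest).1, (pvSections rest).2) := by
              simp [pvSections, h, h0]
            rw [hs]
            cases found
            · have h2 : pvAStep2 (false, acc) a b = (false, acc) := by
                obtain ⟨dis, al, cd, sm⟩ := acc; simp [pvAStep2, h0]
              rw [h2, ih false acc]
              simp
            · have h2 : pvAStep2 (true, acc) a b = (true, pvDirStep acc (a, b)) := by
                obtain ⟨dis, al, cd, sm⟩ := acc
                simp only [pvAStep2, pvDirStep, h0, Bool.false_and,
                  Bool.false_eq_true, if_false]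
                split_ifs <;> simp_all
              rw [h2, ih true (pvDirStep acc (a, b))]
              simp

-- ===== VERDICT (by name: the statement is the Claim_ definition above) =====
theorem parse_robots_content_spec : Claim_equal_parse_robots_content := by
  intro s _
  unfold Spec_parse_robots_content parse_robots_content parse_robots_content_alt
  rw [pvB_fold, List.reverse_reverse]
  simpa using pvKey ((PySem.Str.split? s "\n").getD []) false ([], [], 5, none)
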